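-- pv_equiv track=rewrite | github.com/LolSayna/LearningPatternsfromTextualData | src/patternUtil.py | convertToIntarray
-- ===== SOURCE A (Python) =====
-- def convertToIntarray(pattern):
--     # converts a pattern form the alphabet form, into the int array system
--     pat = []
--     for i, c in enumerate(pattern):
--
--         # an uppercase character means a variable
--         if ord("A") <= ord(c) <= ord("Y"):
--             # since all variables are even, the integer gets multiplied by 2
--             pat.append((ord(c) - ord("A")) * 2)
--
--         # a lowercase character means a terminal
--         elif ord("a") <= ord(c) <= ord("y"):
--             pat.append((ord(c) - ord("a")) * 2 + 1)
--
--         # a Z/z is usually followed by its number behind it, so it can easily added into the array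
--         # if theres no number behind it converts Z-> Z50, z->z51
--         elif c == "Z" or c == "z":
--
--             #find how long the number is
--             j = 1
--             while(i+j < len(pattern) and pattern[i+j].isdigit()):
--                 j += 1
--
--             # check if a number was behind the z
--             if j > 1:
--                 pat.append(int(pattern[i+1:i+j]))
--             else:
--                 if c == "Z":
--                     pat.append((ord(c) - ord("A")) * 2)
--                 else:
--                     pat.append((ord(c) - ord("a")) * 2 + 1)
--
--     return pat
-- ===== SOURCE B (Python) =====
-- import re
--
-- def convertToIntarray(pattern):
--     # tokenize: a Z/z grabs its following digit run; any other char is its own token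
--     # ('.' skips newlines, just as A's fall-through ignores them)
--     tokens = re.findall(r'[Zz]\d+|.', pattern)
--     pat = []
--     for tok in tokens:
--         if len(tok) > 1:
--             pat.append(int(tok[1:]))
--         elif tok == 'Z':
--             pat.append(50)
--         elif tok == 'z':
--             pat.append(51)
--         elif 'A' <= tok <= 'Y':
--             pat.append((ord(tok) - ord('A')) * 2)
--         elif 'a' <= tok <= 'y':
--             pat.append((ord(tok) - ord('a')) * 2 + 1)
--     return pat
-- ===== Notes on version B (the rewrite author's own statement) =====
-- stated objective: idiomatic
-- what changed: B first tokenizes the string with the regex [Zz]\d+|. into an explicit token list (a Z/z greedily capturing its digit run) and then maps each token to its code, replacing A's indexed loop with manual digit lookahead and fall-through skipping of digits.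
import Mathlib
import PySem

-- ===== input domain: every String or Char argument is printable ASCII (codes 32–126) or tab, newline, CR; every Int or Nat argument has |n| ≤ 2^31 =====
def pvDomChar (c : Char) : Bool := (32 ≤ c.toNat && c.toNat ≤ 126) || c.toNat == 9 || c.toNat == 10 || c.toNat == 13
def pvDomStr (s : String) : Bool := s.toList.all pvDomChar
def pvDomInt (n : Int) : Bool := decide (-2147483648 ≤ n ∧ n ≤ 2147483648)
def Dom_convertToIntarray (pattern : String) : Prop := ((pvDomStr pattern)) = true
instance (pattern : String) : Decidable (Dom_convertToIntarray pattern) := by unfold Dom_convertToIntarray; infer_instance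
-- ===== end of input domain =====

-- B tokenizes the pattern into an explicit token list (Z/z with its digit run, else single chars) and maps tokens to codes; idiomatic re-decomposition of A's indexed lookahead loop.


-- ===== PORT A =====
-- the inner `while(i+j < len(pattern) and pattern[i+j].isdigit()): j += 1`
-- (PySem.Chars.isdigit is Python's str.isdigit, exact on the ASCII domain)
def aCount (s : List Char) (i j : Nat) : Nat :=
  if h : i + j < s.length then
    if PySem.Chars.isdigit s[i + j] then aCount s i (j + 1) else j
  else j
termination_by s.length - (i + j)

-- the `for i, c in enumerate(pattern)` loop, accumulating `pat`; the int() of the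
-- slice never raises there (the slice is a nonempty digit run), so .getD 0 is never used
def aLoop (s : List Char) (i : Nat) (chars : List Char) (pat : List Int) : List Int :=
  match chars with
  | [] => pat
  | c :: rest =>
    aLoop s (i + 1) rest
      (if 65 ≤ c.toNat ∧ c.toNat ≤ 89 then pat ++ [((c.toNat : Int) - 65) * 2]
       else if 97 ≤ c.toNat ∧ c.toNat ≤ 121 then pat ++ [((c.toNat : Int) - 97) * 2 + 1]
       else if c = 'Z' ∨ c = 'z' then
         let j := aCount s i 1
         if 1 < j then
           pat ++ [(PySem.Int.ofChars? (PySem.List.slice s (some ((i : Int) + 1)) (some ((i : Int) + (j : Int))))).getD 0]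
         else if c = 'Z' then pat ++ [((c.toNat : Int) - 65) * 2]
         else pat ++ [((c.toNat : Int) - 97) * 2 + 1]
       else pat)


def convertToIntarray (pattern : String) : List Int :=
  aLoop pattern.toList 0 pattern.toList []

-- ===== PORT B =====
-- re.findall(r'[Zz]\d+|.', pattern): a Z/z grabs its following digit run, any other
-- char is its own token, and '.' skips newlines; \d is exact = isdigit on ASCII
def tokenize (s : List Char) : List (List Char) :=
  match s with
  | [] => []
  | c :: rest =>
    if c = 'Z' ∨ c = 'z' then
      let ds := rest.takeWhile PySem.Chars.isdigit
      (c :: ds) :: tokenize (rest.drop ds.length)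
    else if c = '\n' then tokenize rest
    else [c] :: tokenize rest
termination_by s.length
decreasing_by
  · simp only [List.length_cons]
    have : (rest.drop (List.takeWhile PySem.Chars.isdigit rest).length).length = rest.length - (List.takeWhile PySem.Chars.isdigit rest).length := List.length_drop ..
    omega
  · simp
  · simp

-- the if-chain over one token; int(tok[1:]) never raises (tok[1:] is a nonempty digit run)
def tokVal (tok : List Char) : Option Int :=
  match tok with
  | _ :: d :: ds => some ((PySem.Int.ofChars? (d :: ds)).getD 0)
  | [c] =>
    if c = 'Z' then some 50
    else if c = 'z' then some 51
    else if 'A' ≤ c ∧ c ≤ 'Y' then some (((c.toNat : Int) - 65) * 2)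
    else if 'a' ≤ c ∧ c ≤ 'y' then some (((c.toNat : Int) - 97) * 2 + 1)
    else none
  | [] => none


def convertToIntarray_alt (pattern : String) : List Int :=
  (tokenize pattern.toList).filterMap tokVal

-- ===== PRECONDITION & SPEC =====
def Spec_convertToIntarray (pattern : String) (out : List Int) : Prop := out = convertToIntarray_alt pattern
instance (pattern : String) (out : List Int) : Decidable (Spec_convertToIntarray pattern out) := by unfold Spec_convertToIntarray; infer_instance

-- ===== CLAIM (what is proved, stated in full; the proofs are below) =====
def Claim_equal_convertToIntarray : Prop := ∀ (pattern : String), Dom_convertToIntarray pattern → Spec_convertToIntarray pattern (convertToIntarray pattern)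

-- ===== LEMMAS AND PROOFS =====
lemma charLe_iff (a c : Char) : a ≤ c ↔ a.toNat ≤ c.toNat := by
  rw [Char.le_def]; exact UInt32.le_iff_toNat_le ..

lemma isdigit_code {c : Char} (h : PySem.Chars.isdigit c = true) :
    48 ≤ c.toNat ∧ c.toNat ≤ 57 := by
  simp [PySem.Chars.isdigit, Char.le_def, UInt32.le_iff_toNat_le] at h
  exact h

lemma aCount_eq (s : List Char) (i j : Nat) :
    aCount s i j = j + ((s.drop (i + j)).takeWhile PySem.Chars.isdigit).length := by
  fun_induction aCount s i j with
  | case1 j h hd ih =>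
      rw [ih]
      have hdrop : s.drop (i + j) = s[i+j] :: s.drop (i + j + 1) := List.drop_eq_getElem_cons h
      rw [hdrop, List.takeWhile_cons_of_pos hd]
      have : i + (j + 1) = i + j + 1 := by omega
      rw [this]; simp; omega
  | case2 j h hd =>
      have hdrop : s.drop (i + j) = s[i+j] :: s.drop (i + j + 1) := List.drop_eq_getElem_cons h
      rw [hdrop, List.takeWhile_cons_of_neg (by simp [hd])]
      simp
  | case3 j h =>
      rw [List.drop_eq_nil_of_le (by omega)]
      simp

lemma aLoop_digits (s : List Char) (ds t : List Char) (i : Nat) (pat : List Int)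
    (hds : ∀ c ∈ ds, PySem.Chars.isdigit c = true) :
    aLoop s i (ds ++ t) pat = aLoop s (i + ds.length) t pat := by
  induction ds generalizing i with
  | nil => simp
  | cons c ds ih =>
      have hc := isdigit_code (hds c (by simp))
      have hZ : c ≠ 'Z' := by rintro rfl; revert hc; decide
      have hz : c ≠ 'z' := by rintro rfl; revert hc; decide
      rw [List.cons_append]
      show aLoop s (i+1) (ds ++ t) _ = _
      rw [if_neg (by omega), if_neg (by omega), if_neg (by simp [hZ, hz])]
      rw [ih (i+1) (fun c h => hds c (by simp [h]))]
      congr 1; simp; omega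

lemma aLoop_eq (n : Nat) (chars s : List Char) (i : Nat) (pat : List Int)
    (hn : chars.length ≤ n) (h : s.drop i = chars) :
    aLoop s i chars pat = pat ++ (tokenize chars).filterMap tokVal := by
  induction n generalizing chars i pat with
  | zero =>
      have : chars = [] := List.eq_nil_of_length_eq_zero (by omega)
      subst this; simp [aLoop, tokenize]
  | succ n ih =>
      match chars with
      | [] => simp [aLoop, tokenize]
      | c :: rest =>
        have hrest : s.drop (i + 1) = rest := by
          have h1 : s.drop (i + 1) = (s.drop i).drop 1 := by
            rw [List.drop_drop]
          rw [h1, h]; simp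
        have hlen : rest.length ≤ n := by
          have : (c :: rest).length = rest.length + 1 := by simp
          omega
        have cA : ('A').toNat = 65 := rfl
        have cY : ('Y').toNat = 89 := rfl
        have ca : ('a').toNat = 97 := rfl
        have cy : ('y').toNat = 121 := rfl
        show aLoop s (i+1) rest _ = _
        by_cases hU : 65 ≤ c.toNat ∧ c.toNat ≤ 89
        · -- uppercase A..Y
          have hZ : ¬ (c = 'Z' ∨ c = 'z') := by
            rintro (rfl | rfl) <;> revert hU <;> decide
          have hNl : c ≠ '\n' := by rintro rfl; revert hU; decide
          rw [if_pos hU]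
          rw [ih rest (i+1) _ hlen hrest]
          rw [tokenize]
          rw [if_neg hZ, if_neg hNl]
          simp only [List.filterMap_cons]
          rw [show tokVal [c] = some (((c.toNat : Int) - 65) * 2) from by
            rw [tokVal]
            rw [if_neg (by rintro rfl; revert hU; decide), if_neg (by rintro rfl; revert hU; decide)]
            rw [if_pos (by rw [charLe_iff, charLe_iff, cA, cY]; exact hU)]]
          simp
        · rw [if_neg hU]
          by_cases hL : 97 ≤ c.toNat ∧ c.toNat ≤ 121
          · -- lowercase a..y
            have hZ : ¬ (c = 'Z' ∨ c = 'z') := by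
              rintro (rfl | rfl) <;> revert hL <;> decide
            have hNl : c ≠ '\n' := by rintro rfl; revert hL; decide
            rw [if_pos hL, ih rest (i+1) _ hlen hrest, tokenize, if_neg hZ, if_neg hNl]
            simp only [List.filterMap_cons]
            rw [show tokVal [c] = some (((c.toNat : Int) - 97) * 2 + 1) from by
              rw [tokVal]
              rw [if_neg (by rintro rfl; revert hL; decide), if_neg (by rintro rfl; revert hL; decide)]
              rw [if_neg (by rw [charLe_iff, charLe_iff, cA, cY]; omega)]
              rw [if_pos (by rw [charLe_iff, charLe_iff, ca, cy]; exact hL)]]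
            simp
          · rw [if_neg hL]
            by_cases hZ : c = 'Z' ∨ c = 'z'
            · -- Z / z with digit lookahead
              rw [if_pos hZ]
              have hcount : aCount s i 1 = 1 + (rest.takeWhile PySem.Chars.isdigit).length := by
                rw [aCount_eq, hrest]
              rw [tokenize, if_pos hZ]
              rcases hcase : rest.takeWhile PySem.Chars.isdigit with _ | ⟨d, ds'⟩
              · -- no digits behind the Z/z
                rw [hcase] at hcount
                simp only [List.length_nil, List.drop_zero]
                rw [hcount, if_neg (by simp)]
                rw [ih rest (i+1) _ hlen hrest]
                simp only [List.filterMap_cons]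
                rcases hZ with rfl | rfl
                · rw [if_pos rfl, show tokVal ['Z'] = some 50 from rfl]
                  simp
                · rw [if_neg (by decide), show tokVal ['z'] = some 51 from rfl]
                  simp
              · -- at least one digit behind the Z/z
                rw [hcase] at hcount
                rw [hcount, if_pos (by simp)]
                have hpre : rest.take (d :: ds').length = d :: ds' := by
                  rw [← hcase]
                  exact (List.prefix_iff_eq_take.mp (List.takeWhile_prefix _)).symm
                have hdig : ∀ x ∈ (d :: ds'), PySem.Chars.isdigit x = true := by
                  rw [← hcase]; exact fun x hx => List.mem_takeWhile_imp hx
                have hslice : PySem.List.slice s (some ((i : Int) + 1)) (some ((i : Int) + ((1 + (d :: ds').length : Nat) : Int))) = d :: ds' := by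
                  have e1 : ((i : Int) + 1) = ((i + 1 : Nat) : Int) := by push_cast; ring
                  have e2 : ((i : Int) + ((1 + (d :: ds').length : Nat) : Int)) = ((i + 1 : Nat) : Int) + (((d :: ds').length : Nat) : Int) := by push_cast; ring
                  rw [e1, e2, PySem.List.slice_natCast_add, hrest, hpre]
                rw [hslice]
                have hsplit : (d :: ds') ++ rest.drop (d :: ds').length = rest := by
                  have h0 := List.take_append_drop (d :: ds').length rest
                  rw [hpre] at h0; exact h0
                have hdrop2 : s.drop (i + 1 + (d :: ds').length) = rest.drop (d :: ds').length := by
                  rw [← hrest, List.drop_drop]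
                have hlent : (rest.drop (d :: ds').length).length ≤ n := by
                  have := List.length_drop (l := rest) (i := (d :: ds').length); omega
                conv_lhs => rw [show rest = (d :: ds') ++ rest.drop (d :: ds').length from hsplit.symm]
                rw [aLoop_digits s (d :: ds') _ _ _ hdig]
                rw [ih (rest.drop (d :: ds').length) (i + 1 + (d :: ds').length) _ hlent hdrop2]
                simp only [List.filterMap_cons]
                rw [show tokVal (c :: d :: ds') = some ((PySem.Int.ofChars? (d :: ds')).getD 0) from rfl]
                simp
            · -- any other character: skipped
              rw [if_neg hZ]
              rw [ih rest (i+1) _ hlen hrest]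
              by_cases hNl : c = '\n'
              · rw [tokenize, if_neg hZ, if_pos hNl]
              · rw [tokenize, if_neg hZ, if_neg hNl]
                simp only [List.filterMap_cons]
                rw [show tokVal [c] = none from by
                  rw [tokVal]
                  rw [if_neg (by rintro rfl; exact hZ (Or.inl rfl)), if_neg (by rintro rfl; exact hZ (Or.inr rfl))]
                  rw [if_neg (by rw [charLe_iff, charLe_iff, cA, cY]; omega), if_neg (by rw [charLe_iff, charLe_iff, ca, cy]; omega)]]

-- ===== VERDICT (by name: the statement is the Claim_ definition above) =====
theorem convertToIntarray_spec : Claim_equal_convertToIntarray := by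
  intro pattern _
  unfold Spec_convertToIntarray convertToIntarray convertToIntarray_alt
  exact aLoop_eq pattern.toList.length pattern.toList pattern.toList 0 [] le_rfl rfl
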